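-- pv_equiv track=rewrite | github.com/DanvdBoo/Advent-Of-Code | 2023/15.py | part1
-- ===== SOURCE A (Python) =====
-- def part1(s: str):
--     def hash(input: str):
--         result = 0
--         for char in input:
--             result += ord(char)
--             result *= 17
--             result %= 256
--         return result
--
--     result = 0
--     for string in s.replace('\n', '').split(','):
--         result += hash(string)
--     return result
-- ===== SOURCE B (Python) =====
-- # 17 has multiplicative order 16 mod 256, so HASH(token) is the weighted sum
-- # sum(ord(c) * 17^(distance from end) ) mod 256, with exponents taken mod 16.
-- POW = [pow(17, e, 256) for e in range(16)]
--
-- def part1(s: str):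
--     total = 0
--     for token in s.replace('\n', '').split(','):
--         acc = 0
--         e = 1
--         for c in reversed(token):
--             acc += ord(c) * POW[e % 16]
--             e += 1
--         total += acc % 256
--     return total
-- ===== Notes on version B (the rewrite author's own statement) =====
-- stated objective: alternative
-- what changed: Each token's HASH is computed as a position-weighted polynomial sum(ord(c)*17^(distance from end)) with a single final mod 256, using a precomputed 16-entry table of 17^e mod 256 (17 has multiplicative order 16 mod 256), instead of A's per-character (acc+ord)*17%256 state chain.
import Mathlib
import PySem

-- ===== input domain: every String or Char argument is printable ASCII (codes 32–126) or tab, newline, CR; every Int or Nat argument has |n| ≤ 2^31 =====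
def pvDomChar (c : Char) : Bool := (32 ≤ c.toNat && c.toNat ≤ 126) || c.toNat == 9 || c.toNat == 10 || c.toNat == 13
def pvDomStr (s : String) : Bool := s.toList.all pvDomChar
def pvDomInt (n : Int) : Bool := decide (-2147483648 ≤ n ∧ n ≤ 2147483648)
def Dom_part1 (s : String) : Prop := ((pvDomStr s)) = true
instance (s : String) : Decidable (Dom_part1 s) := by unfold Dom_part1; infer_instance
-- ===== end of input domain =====

-- B computes each token's HASH as a position-weighted polynomial with a precomputed
-- table of 17^e mod 256 (order 16) and one final mod, instead of A's per-char mod chain.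

-- ===== PORT A =====
-- A's inner 'hash': result += ord(char); result *= 17; result %= 256, over the token's chars
def part1Hash (input : List Char) : Int :=
  input.foldl (fun result char => PySem.Int.mod ((result + (char.toNat : Int)) * 17) 256) 0

def part1 (s : String) : Int :=
  (PySem.Chars.splitOn (PySem.Str.replace s "\n" "").toList [',']).foldl
    (fun result string => result + part1Hash string) 0

-- ===== PORT B =====
-- POW = [pow(17, e, 256) for e in range(16)]
def pvPOW : List Int := [1, 17, 33, 49, 65, 81, 97, 113, 129, 145, 161, 177, 193, 209, 225, 241]

-- B's inner loop: acc += ord(c) * POW[e % 16]; e += 1, over reversed(token); then acc % 256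
def pvHashB (token : List Char) : Int :=
  let p := token.reverse.foldl
    (fun (st : Int × Nat) c => (st.1 + (c.toNat : Int) * pvPOW.getD (st.2 % 16) 0, st.2 + 1))
    ((0 : Int), (1 : Nat))
  PySem.Int.mod p.1 256

def part1_alt (s : String) : Int :=
  (PySem.Chars.splitOn (PySem.Str.replace s "\n" "").toList [',']).foldl
    (fun total token => total + pvHashB token) 0

-- ===== PRECONDITION & SPEC =====
def Spec_part1 (s : String) (out : Int) : Prop := out = part1_alt s
instance (s : String) (out : Int) : Decidable (Spec_part1 s out) := by unfold Spec_part1; infer_instance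

-- ===== CLAIM (what is proved, stated in full; the proofs are below) =====
def Claim_equal_part1 : Prop := ∀ (s : String), Dom_part1 s → Spec_part1 s (part1 s)

-- ===== LEMMAS AND PROOFS =====

-- one step of A's hash chain
def pvStepA (r : Int) (c : Char) : Int := PySem.Int.mod ((r + (c.toNat : Int)) * 17) 256

-- one step of B's weighted sum (over the reversed token)
def pvStepB (st : Int × Nat) (c : Char) : Int × Nat :=
  (st.1 + (c.toNat : Int) * pvPOW.getD (st.2 % 16) 0, st.2 + 1)

-- the common mathematical value: Σ ord(c_i) * 17^(k-i) in ZMod 256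
def pvW : List Char → ZMod 256
  | [] => 0
  | c :: t => (c.toNat : ZMod 256) * 17 ^ (t.length + 1) + pvW t

theorem pvMod256 (a : Int) : PySem.Int.mod a 256 = a % 256 :=
  PySem.Int.mod_eq_emod_of_pos (by norm_num)

theorem pvCast_mod (a : Int) : ((a % 256 : Int) : ZMod 256) = (a : ZMod 256) := by
  have : ((256 : Int) : ZMod 256) = 0 := by decide
  rw [Int.emod_def]
  push_cast
  rw [show (256 : ZMod 256) = 0 from by decide]
  ring

theorem pvA_bounds (tok : List Char) : ∀ r : Int, 0 ≤ r → r < 256 →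
    0 ≤ tok.foldl pvStepA r ∧ tok.foldl pvStepA r < 256 := by
  induction tok with
  | nil => intro r h1 h2; exact ⟨h1, h2⟩
  | cons c t ih =>
    intro r _ _
    rw [List.foldl_cons]
    exact ih _
      (by rw [pvStepA, pvMod256]; exact Int.emod_nonneg _ (by norm_num))
      (by rw [pvStepA, pvMod256]; exact Int.emod_lt_of_pos _ (by norm_num))

theorem pvA_cast (tok : List Char) : ∀ r : Int,
    ((tok.foldl pvStepA r : Int) : ZMod 256) = (r : ZMod 256) * 17 ^ tok.length + pvW tok := by
  induction tok with
  | nil => intro r; simp [pvW]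
  | cons c t ih =>
    intro r
    rw [List.foldl_cons, ih]
    have : ((pvStepA r c : Int) : ZMod 256) = ((r : ZMod 256) + (c.toNat : ZMod 256)) * 17 := by
      rw [pvStepA, pvMod256, pvCast_mod]; push_cast; ring
    rw [this]
    simp only [pvW, List.length_cons]
    ring

-- table lookup = 17^r in ZMod 256 for r < 16
theorem pvPOW_cast (r : Nat) (h : r < 16) :
    ((pvPOW.getD r 0 : Int) : ZMod 256) = 17 ^ r := by
  interval_cases r <;> decide

-- exponents may be reduced mod 16 since (17 : ZMod 256)^16 = 1
theorem pvPow_mod16 (e : Nat) : (17 : ZMod 256) ^ (e % 16) = 17 ^ e := by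
  conv_rhs => rw [← Nat.div_add_mod e 16]
  rw [pow_add, pow_mul, show (17 : ZMod 256) ^ 16 = 1 from by decide, one_pow, one_mul]

theorem pvB_foldr (tok : List Char) :
    (tok.foldr (fun c st => pvStepB st c) ((0 : Int), (1 : Nat))).2 = tok.length + 1 ∧
    (((tok.foldr (fun c st => pvStepB st c) ((0 : Int), (1 : Nat))).1 : Int) : ZMod 256) = pvW tok := by
  induction tok with
  | nil => exact ⟨rfl, by simp [pvW]⟩
  | cons c t ih =>
    obtain ⟨h2, h1⟩ := ih
    rw [List.foldr_cons]
    set q := List.foldr (fun c st => pvStepB st c) ((0 : Int), (1 : Nat)) t with hq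
    constructor
    · show q.2 + 1 = t.length + 1 + 1
      rw [h2]
    · show ((q.1 + (c.toNat : Int) * pvPOW.getD (q.2 % 16) 0 : Int) : ZMod 256) = pvW (c :: t)
      rw [pvW]
      push_cast
      rw [h1, h2, pvPOW_cast ((t.length + 1) % 16) (Nat.mod_lt _ (by norm_num)), pvPow_mod16]
      ring

-- the two hash computations agree on every token
theorem pvHash_eq (tok : List Char) : part1Hash tok = pvHashB tok := by
  have hB : pvHashB tok =
      (tok.foldr (fun c st => pvStepB st c) ((0 : Int), (1 : Nat))).1 % 256 := by
    rw [pvHashB, List.foldl_reverse, pvMod256]; rfl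
  have hA : part1Hash tok = tok.foldl pvStepA 0 := rfl
  obtain ⟨hb0, hb1⟩ := pvA_bounds tok 0 le_rfl (by norm_num)
  have hcast : ((tok.foldl pvStepA 0 : Int) : ZMod 256) =
      (((tok.foldr (fun c st => pvStepB st c) ((0 : Int), (1 : Nat))).1 % 256 : Int) : ZMod 256) := by
    rw [pvA_cast tok 0, pvCast_mod, (pvB_foldr tok).2]
    simp
  rw [hA, hB]
  have hmod : tok.foldl pvStepA 0 % 256 =
      (tok.foldr (fun c st => pvStepB st c) ((0 : Int), (1 : Nat))).1 % 256 % 256 :=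
    (ZMod.intCast_eq_intCast_iff' _ _ _).mp hcast
  rw [← Int.emod_eq_of_lt hb0 hb1, hmod, Int.emod_emod_of_dvd _ (dvd_refl _)]

-- ===== VERDICT (by name: the statement is the Claim_ definition above) =====
theorem part1_spec : Claim_equal_part1 := by
  intro s _
  unfold Spec_part1 part1 part1_alt
  have : (fun (result : Int) (string : List Char) => result + part1Hash string)
       = (fun (total : Int) (token : List Char) => total + pvHashB token) := by
    funext r tok; rw [pvHash_eq]
  rw [this]
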